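-- pv_equiv track=rewrite | github.com/seemaullal/advent-of-code | 2025/06/solution.py | get_numbers_p1
-- ===== SOURCE A (Python) =====
-- def get_numbers_p1(rows, cols):
--     nums = []
--     for row in rows:
--         current = 0
--         for i in cols:
--             if i < len(row) and row[i].isdigit():
--                 current = current * 10 + int(row[i])
--         nums.append(current)
--     return nums
-- ===== SOURCE B (Python) =====
-- def get_numbers_p1(rows, cols):
--     nums = []
--     for row in rows:
--         ds = [int(row[i]) for i in cols if i < len(row) and row[i].isdigit()]
--         total, place = 0, 1
--         for d in reversed(ds):
--             total += d * place
--             place *= 10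
--         nums.append(total)
--     return nums
-- ===== Notes on version B (the rewrite author's own statement) =====
-- stated objective: alternative
-- what changed: B first collects the digit values at the selected columns into a list, then combines them back-to-front with an explicit place-value accumulator (total += d*place, place *= 10), instead of A's inline Horner accumulation current*10+int(row[i]) inside the column loop; Pre_ excludes only inputs where both raise IndexError (a column index below -len(row)).
import Mathlib
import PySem

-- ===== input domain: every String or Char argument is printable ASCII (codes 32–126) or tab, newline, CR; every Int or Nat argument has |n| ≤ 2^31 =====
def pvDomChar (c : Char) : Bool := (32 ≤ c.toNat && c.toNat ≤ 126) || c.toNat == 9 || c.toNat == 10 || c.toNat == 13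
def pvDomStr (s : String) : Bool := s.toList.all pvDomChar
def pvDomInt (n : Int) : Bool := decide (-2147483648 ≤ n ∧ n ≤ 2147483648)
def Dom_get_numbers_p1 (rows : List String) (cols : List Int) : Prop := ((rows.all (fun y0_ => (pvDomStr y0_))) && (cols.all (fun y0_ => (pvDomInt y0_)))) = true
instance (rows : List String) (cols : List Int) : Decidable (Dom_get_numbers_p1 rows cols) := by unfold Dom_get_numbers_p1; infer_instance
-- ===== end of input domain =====

-- B collects the digit values per row and combines them back-to-front with a place-value
-- accumulator instead of A's inline Horner accumulation; same cost, different decomposition.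

-- int(row[i]) for a single character (both Pythons call int on one digit character;
-- the default 0 is unreachable: the call sites guard with isdigit)
def pvDigitInt (c : Char) : Int := (PySem.Int.ofChars? [c]).getD 0

-- ===== PORT A =====
def get_numbers_p1 (rows : List String) (cols : List Int) : List Int :=
  rows.foldl (fun nums row =>
    nums ++ [cols.foldl (fun current i =>
      if i < PySem.Str.len row then
        match PySem.Str.pyGet? row i with
        | some c => if PySem.Chars.isdigit c then current * 10 + pvDigitInt c else current
        | none => current   -- Python raises IndexError here (i < -len(row)); excluded by Pre_
      else current) 0]) []

-- ===== PORT B =====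
def get_numbers_p1_alt (rows : List String) (cols : List Int) : List Int :=
  rows.map (fun row =>
    let ds : List Int := cols.filterMap (fun i =>
      if i < PySem.Str.len row then
        match PySem.Str.pyGet? row i with
        | some c => if PySem.Chars.isdigit c then some (pvDigitInt c) else none
        | none => none   -- Python raises IndexError here (i < -len(row)); excluded by Pre_
      else none)
    (ds.reverse.foldl (fun tp d => (tp.1 + d * tp.2, tp.2 * 10)) ((0 : Int), (1 : Int))).1)

-- ===== PRECONDITION & SPEC =====
-- Pre_ excludes exactly the inputs where Python A (and B alike) raises IndexError: a column
-- index i < -len(row) passes the guard 'i < len(row)' and then row[i] is out of range.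
def Pre_get_numbers_p1 (rows : List String) (cols : List Int) : Prop :=
  ∀ s ∈ rows, ∀ i ∈ cols, -(PySem.Str.len s) ≤ i
instance (rows : List String) (cols : List Int) : Decidable (Pre_get_numbers_p1 rows cols) := by unfold Pre_get_numbers_p1; infer_instance
def pvWitness_get_numbers_p1 : List String × List Int := (["ab12", "3x4"], [0, 2, -1, 7])

def Spec_get_numbers_p1 (rows : List String) (cols : List Int) (out : List Int) : Prop := out = get_numbers_p1_alt rows cols
instance (rows : List String) (cols : List Int) (out : List Int) : Decidable (Spec_get_numbers_p1 rows cols out) := by unfold Spec_get_numbers_p1; infer_instance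

-- ===== CLAIM (what is proved, stated in full; the proofs are below) =====
def Claim_equal_get_numbers_p1 : Prop := ∀ (rows : List String) (cols : List Int), Dom_get_numbers_p1 rows cols → Pre_get_numbers_p1 rows cols → Spec_get_numbers_p1 rows cols (get_numbers_p1 rows cols)

-- ===== LEMMAS AND PROOFS =====

-- Horner fold with an arbitrary initial accumulator
theorem pv_horner_init (ds : List Int) (a : Int) :
    ds.foldl (fun c d => c * 10 + d) a
      = a * 10 ^ ds.length + ds.foldl (fun c d => c * 10 + d) 0 := by
  induction ds generalizing a with
  | nil => simp
  | cons x ds ih =>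
    simp only [List.foldl_cons, List.length_cons]
    rw [ih (a * 10 + x), ih (0 * 10 + x)]
    ring

-- the back-to-front place-value fold computes the Horner value (and the next place)
theorem pv_place_value (ds : List Int) :
    ds.reverse.foldl (fun tp d => (tp.1 + d * tp.2, tp.2 * 10)) ((0 : Int), (1 : Int))
      = (ds.foldl (fun c d => c * 10 + d) 0, 10 ^ ds.length) := by
  rw [List.foldl_reverse]
  induction ds with
  | nil => simp
  | cons x ds ih =>
    simp only [List.foldr_cons, ih, List.foldl_cons, List.length_cons]
    rw [pv_horner_init ds (0 * 10 + x)]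
    exact Prod.ext (by ring) (by ring)

-- a fold that skips via an Option-valued selector equals the fold over the filterMap
theorem pv_foldl_filterMap (l : List Int) (g : Int → Option Int) (a : Int) :
    l.foldl (fun c i => match g i with | some d => c * 10 + d | none => c) a
      = (l.filterMap g).foldl (fun c d => c * 10 + d) a := by
  induction l generalizing a with
  | nil => rfl
  | cons x l ih =>
    simp only [List.foldl_cons, List.filterMap_cons]
    cases g x <;> simp [ih]

-- A's loop body equals the Option-selector form B filters with
theorem pv_step_eq (row : String) (current i : Int) :
    (if i < PySem.Str.len row then
       match PySem.Str.pyGet? row i with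
       | some c => if PySem.Chars.isdigit c then current * 10 + pvDigitInt c else current
       | none => current
     else current)
      = (match (if i < PySem.Str.len row then
                  match PySem.Str.pyGet? row i with
                  | some c => if PySem.Chars.isdigit c then some (pvDigitInt c) else none
                  | none => none
                else none) with
         | some d => current * 10 + d
         | none => current) := by
  by_cases h : i < PySem.Str.len row
  · simp only [h, if_true]
    cases PySem.Str.pyGet? row i with
    | none => rfl
    | some c => by_cases hd : PySem.Chars.isdigit c <;> simp [hd]
  · simp only [if_neg h]

theorem get_numbers_p1_row_eq (row : String) (cols : List Int) :
    cols.foldl (fun current i =>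
      if i < PySem.Str.len row then
        match PySem.Str.pyGet? row i with
        | some c => if PySem.Chars.isdigit c then current * 10 + pvDigitInt c else current
        | none => current
      else current) (0 : Int)
    = ((cols.filterMap (fun i =>
        if i < PySem.Str.len row then
          match PySem.Str.pyGet? row i with
          | some c => if PySem.Chars.isdigit c then some (pvDigitInt c) else none
          | none => none
        else none)).reverse.foldl
          (fun tp d => (tp.1 + d * tp.2, tp.2 * 10)) ((0 : Int), (1 : Int))).1 := by
  rw [pv_place_value]
  rw [← pv_foldl_filterMap]
  exact PySem.List.foldl_congr_mem cols _ _ 0 (fun a i _ => pv_step_eq row a i)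

-- ===== VERDICT (by name: the statement is the Claim_ definition above) =====
theorem get_numbers_p1_spec : Claim_equal_get_numbers_p1 := by
  intro rows cols _ _
  unfold Spec_get_numbers_p1 get_numbers_p1 get_numbers_p1_alt
  rw [PySem.List.foldl_append_singleton_eq_map]
  exact List.map_congr_left (fun row _ => get_numbers_p1_row_eq row cols)
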